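-- pv_equiv track=rewrite | github.com/Dipankar2020-ai/DA-Preparation | Programming, Data Structures and Algorithms/Python Programming/Programming Problems-1/Peak element.py | maxneighbourfound
-- ===== SOURCE A (Python) =====
-- def maxneighbourfound(li):
--
--     maxneighbour=-10000
--     pos=-1
--     n=len(li)
--     flag=False
--     for i in range(1,n):
--         if li[i]>li[i-1] :
--             maxneighbour=li[i]
--             pos=i
--             flag=True
--     if flag==False:
--         return 0
--     else:
--         return pos
-- ===== SOURCE B (Python) =====
-- def maxneighbourfound(li):
--     for i in range(len(li) - 1, 0, -1):
--         if li[i] > li[i - 1]: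
--             return i
--     return 0
-- ===== Notes on version B (the rewrite author's own statement) =====
-- stated objective: simpler
-- what changed: Replaces A's full forward sweep maintaining pos/flag/maxneighbour state with a reverse scan that returns the first qualifying index immediately (no state, early exit), returning 0 after the loop for the no-match case.
import Mathlib
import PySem

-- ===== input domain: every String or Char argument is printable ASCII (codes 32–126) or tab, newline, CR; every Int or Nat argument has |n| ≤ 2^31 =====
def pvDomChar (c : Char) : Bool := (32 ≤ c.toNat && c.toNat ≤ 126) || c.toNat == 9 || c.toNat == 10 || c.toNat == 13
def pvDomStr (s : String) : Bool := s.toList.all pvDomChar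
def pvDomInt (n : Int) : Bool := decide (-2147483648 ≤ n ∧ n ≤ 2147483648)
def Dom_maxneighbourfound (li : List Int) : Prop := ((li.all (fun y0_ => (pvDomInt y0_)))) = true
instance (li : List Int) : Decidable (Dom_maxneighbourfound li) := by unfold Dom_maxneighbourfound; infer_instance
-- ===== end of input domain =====

-- B replaces A's full forward sweep with pos/flag state by a reverse scan returning the
-- first qualifying index immediately (early exit, no state); objective: simpler.

-- ===== PORT A =====
-- literal transliteration of A: forward loop over range(1, n) keeping (maxneighbour, pos, flag)
def maxneighbourfound (li : List Int) : Int :=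
  let n : Int := li.length
  let st := (PySem.List.pyRange 1 n 1).foldl
    (fun (s : Int × Int × Bool) i =>
      if PySem.List.pyGetD li i 0 > PySem.List.pyGetD li (i - 1) 0 then
        (PySem.List.pyGetD li i 0, i, true)
      else s)
    (-10000, -1, false)
  if st.2.2 = false then 0 else st.2.1

-- ===== PORT B =====
-- reverse scan: i = length-1, length-2, …, 1; return i on first li[i] > li[i-1]; else 0
def mnfRevScan (li : List Int) : Nat → Int
  | 0 => 0
  | k + 1 => if li.getD (k + 1) 0 > li.getD k 0 then ((k + 1 : Nat) : Int) else mnfRevScan li k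

def maxneighbourfound_alt (li : List Int) : Int := mnfRevScan li (li.length - 1)

-- ===== PRECONDITION & SPEC =====
def Spec_maxneighbourfound (li : List Int) (out : Int) : Prop := out = maxneighbourfound_alt li
instance (li : List Int) (out : Int) : Decidable (Spec_maxneighbourfound li out) := by unfold Spec_maxneighbourfound; infer_instance

-- ===== CLAIM (what is proved, stated in full; the proofs are below) =====
def Claim_equal_maxneighbourfound : Prop := ∀ (li : List Int), Dom_maxneighbourfound li → Spec_maxneighbourfound li (maxneighbourfound li)

-- ===== LEMMAS AND PROOFS =====

def mnfStep (li : List Int) (s : Int × Int × Bool) (i : Int) : Int × Int × Bool :=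
  if PySem.List.pyGetD li i 0 > PySem.List.pyGetD li (i - 1) 0 then
    (PySem.List.pyGetD li i 0, i, true)
  else s

def mnfLoop (li : List Int) (m : Int) : Int × Int × Bool :=
  (PySem.List.pyRange 1 m 1).foldl (mnfStep li) (-10000, -1, false)

theorem mnfLoop_eq_rev (li : List Int) (k : Nat) :
    (if (mnfLoop li ((k : Int) + 1)).2.2 = false then 0 else (mnfLoop li ((k : Int) + 1)).2.1)
      = mnfRevScan li k := by
  induction k with
  | zero =>
    simp [mnfLoop, PySem.List.pyRange_one_eq_nil (by norm_num : (1:Int) ≤ 1), mnfRevScan]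
  | succ k ih =>
    have hsplit : PySem.List.pyRange 1 ((k : Int) + 1 + 1) 1
        = PySem.List.pyRange 1 ((k : Int) + 1) 1 ++ [(k : Int) + 1] :=
      PySem.List.pyRange_one_succ_right (by omega)
    have hfold : mnfLoop li ((k : Int) + 1 + 1)
        = mnfStep li (mnfLoop li ((k : Int) + 1)) ((k : Int) + 1) := by
      simp [mnfLoop, hsplit]
    have hcast : ((k : Int) + 1 + 1) = (((k + 1 : Nat) : Int) + 1) := by push_cast; ring
    rw [← hcast, hfold]
    unfold mnfStep
    have h1 : PySem.List.pyGetD li ((k : Int) + 1) 0 = li.getD (k + 1) 0 := by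
      rw [show ((k : Int) + 1) = ((k + 1 : Nat) : Int) by push_cast; ring,
        PySem.List.pyGetD_natCast]
    have h2 : PySem.List.pyGetD li ((k : Int) + 1 - 1) 0 = li.getD k 0 := by
      rw [show ((k : Int) + 1 - 1) = ((k : Nat) : Int) by ring,
        PySem.List.pyGetD_natCast]
    rw [h1, h2]
    by_cases h : li.getD (k + 1) 0 > li.getD k 0
    · rw [if_pos h]
      simp only [mnfRevScan, if_pos h]
      norm_num
    · rw [if_neg h]
      simp only [mnfRevScan, if_neg h]
      exact ih

theorem maxneighbourfound_eq (li : List Int) :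
    maxneighbourfound li = maxneighbourfound_alt li := by
  unfold maxneighbourfound maxneighbourfound_alt
  cases hl : li.length with
  | zero =>
    simp [mnfRevScan, PySem.List.pyRange_one_eq_nil (by norm_num : (0 : Int) ≤ 1)]
  | succ k =>
    have h := mnfLoop_eq_rev li k
    simp only [mnfLoop] at h
    simp only [Nat.add_sub_cancel]
    rw [show (((k + 1 : Nat) : Int)) = ((k : Int) + 1) by push_cast; ring]
    exact h

-- ===== VERDICT (by name: the statement is the Claim_ definition above) =====
theorem maxneighbourfound_spec : Claim_equal_maxneighbourfound := by
  intro li _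
  unfold Spec_maxneighbourfound
  exact maxneighbourfound_eq li
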